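-- pv_equiv track=rewrite | github.com/0rangeAppl3/job-scraper | scraper.py | generate_common_selector
-- ===== SOURCE A (Python) =====
-- def generate_common_selector(selectors):
--     arr = [s.replace(' > ', '> ').split(' ') for s in selectors]
--     arr.sort()
--     a1 = arr[0]
--     a2 = arr[len(arr) - 1]
--     L = len(a1)
--     i = 0
--     while i < L and a1[i] == a2[i]:
--         i += 1
--     return ' '.join([s.replace('>', ' >') for s in a1[:i]])
-- ===== SOURCE B (Python) =====
-- def generate_common_selector(selectors):
--     arr = [s.replace(' > ', '> ').split(' ') for s in selectors]
--     t0 = arr[0]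
--     rest = arr[1:]
--     i = 0
--     while i < len(t0) and all(i < len(t) and t[i] == t0[i] for t in rest):
--         i += 1
--     return ' '.join(s.replace('>', ' >') for s in t0[:i])
-- ===== Notes on version B (the rewrite author's own statement) =====
-- stated objective: faster
-- what changed: B drops A's sort entirely: instead of sorting all token lists and comparing only the lexicographic min and max, B scans column by column across all token lists and stops at the first column where any list ends or disagrees.
import Mathlib
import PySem

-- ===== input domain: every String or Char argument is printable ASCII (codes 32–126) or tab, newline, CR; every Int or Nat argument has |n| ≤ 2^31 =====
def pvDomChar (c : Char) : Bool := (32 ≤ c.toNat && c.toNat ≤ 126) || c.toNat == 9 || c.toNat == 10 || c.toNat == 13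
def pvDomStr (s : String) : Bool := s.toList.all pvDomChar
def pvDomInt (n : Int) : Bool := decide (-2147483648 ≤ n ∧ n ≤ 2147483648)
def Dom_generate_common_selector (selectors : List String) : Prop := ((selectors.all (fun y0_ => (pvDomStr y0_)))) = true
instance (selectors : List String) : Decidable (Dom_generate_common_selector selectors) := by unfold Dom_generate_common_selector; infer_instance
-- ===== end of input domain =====

-- B replaces A's sort-then-compare-min-and-max by a direct column-by-column scan of all
-- token lists (no sort); return values agree on every non-empty input (proved below).

-- ===== PORT A =====
-- s.replace(' > ', '> ').split(' ')   (shared by both ports: both Pythons contain this line)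
def pvTok (s : String) : List String :=
  (PySem.Str.split? (PySem.Str.replace s " > " "> ") " ").getD []   -- split? is some: sep " " ≠ ""
-- s.replace('>', ' >')   (shared by both ports)
def pvRepl (s : String) : String := PySem.Str.replace s ">" " >"

-- the while loop 'while i < L and a1[i] == a2[i]: i += 1' as structural recursion on the
-- two lists; a2 running out first would be an IndexError in Python, but that state is
-- unreachable because a1 ≤ a2 after the sort (proved in the lemmas below)
def pvLcpLen : List String → List String → Nat
  | x :: xs, y :: ys => if x = y then pvLcpLen xs ys + 1 else 0
  | _, _ => 0

def generate_common_selector (selectors : List String) : String :=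
  let arr := selectors.map pvTok
  let arrS := PySem.List.sorted arr (fun x => x)   -- arr.sort()  (in-place; local only)
  let a1 := arrS.headD []                          -- arr[0]: IndexError on [] is outside Pre_
  let a2 := arrS.getLastD []                       -- arr[len(arr) - 1]
  let i := pvLcpLen a1 a2
  PySem.Str.join " " ((a1.take i).map pvRepl)      -- ' '.join(… for s in a1[:i])

-- ===== PORT B =====
-- the while loop of Source B: advance i while i < len(t0) and every other token list is
-- still long enough and agrees with t0 at column i
def pvColScan (t0 : List String) (rest : List (List String)) (i : Nat) : Nat :=
  if h : (decide (i < t0.length) && rest.all (fun t => decide (i < t.length) && (t.getD i "" == t0.getD i ""))) = true then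
    pvColScan t0 rest (i + 1)
  else i
termination_by t0.length - i
decreasing_by
  simp only [Bool.and_eq_true, decide_eq_true_eq] at h
  omega

def generate_common_selector_alt (selectors : List String) : String :=
  let arr := selectors.map pvTok
  match arr with
  | [] => ""                                       -- arr[0]: IndexError, outside Pre_
  | t0 :: rest =>
    let i := pvColScan t0 rest 0
    PySem.Str.join " " ((t0.take i).map pvRepl)

-- ===== PRECONDITION & SPEC =====
-- Pre_ excludes only the empty list, on which A (and B) raise IndexError at arr[0].
def Pre_generate_common_selector (selectors : List String) : Prop := selectors ≠ []
instance (selectors : List String) : Decidable (Pre_generate_common_selector selectors) := by unfold Pre_generate_common_selector; infer_instance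
def pvWitness_generate_common_selector : List String := ["div > p a", "div > p b"]

def Spec_generate_common_selector (selectors : List String) (out : String) : Prop := out = generate_common_selector_alt selectors
instance (selectors : List String) (out : String) : Decidable (Spec_generate_common_selector selectors out) := by unfold Spec_generate_common_selector; infer_instance

-- ===== CLAIM (what is proved, stated in full; the proofs are below) =====
def Claim_equal_generate_common_selector : Prop := ∀ (selectors : List String), Dom_generate_common_selector selectors → Pre_generate_common_selector selectors → Spec_generate_common_selector selectors (generate_common_selector selectors)

-- ===== LEMMAS AND PROOFS =====

-- the longest common prefix of two lists, as a list (proof-side characterisation of A's loop)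
def pvLcp : List String → List String → List String
  | x :: xs, y :: ys => if x = y then x :: pvLcp xs ys else []
  | _, _ => []

lemma pvLcp_prefix_left : ∀ (a b : List String), pvLcp a b <+: a
  | [], _ => by simp [pvLcp]
  | _ :: _, [] => by simp [pvLcp]
  | x :: xs, y :: ys => by
    by_cases h : x = y
    · simp only [pvLcp, if_pos h, List.cons_prefix_cons, true_and]
      exact pvLcp_prefix_left xs ys
    · simp [pvLcp, h]

lemma pvLcp_prefix_right : ∀ (a b : List String), pvLcp a b <+: b
  | [], _ => by simp [pvLcp]
  | _ :: _, [] => by simp [pvLcp]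
  | x :: xs, y :: ys => by
    by_cases h : x = y
    · subst h
      simp only [pvLcp, if_true, List.cons_prefix_cons, true_and]
      exact pvLcp_prefix_right xs ys
    · simp [pvLcp, h]

lemma pvLcpLen_eq : ∀ (a b : List String), pvLcpLen a b = (pvLcp a b).length
  | [], _ => by simp [pvLcpLen, pvLcp]
  | _ :: _, [] => by simp [pvLcpLen, pvLcp]
  | x :: xs, y :: ys => by
    by_cases h : x = y
    · simp [pvLcpLen, pvLcp, h, pvLcpLen_eq xs ys]
    · simp [pvLcpLen, pvLcp, h]

-- at the stop index, one list is exhausted or the entries differ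
lemma pvLcp_stop : ∀ (a b : List String),
    (pvLcp a b).length = a.length ∨ (pvLcp a b).length = b.length ∨
      a.getD (pvLcp a b).length "" ≠ b.getD (pvLcp a b).length ""
  | [], _ => by simp [pvLcp]
  | _ :: _, [] => by simp [pvLcp]
  | x :: xs, y :: ys => by
    by_cases h : x = y
    · rcases pvLcp_stop xs ys with h1 | h1 | h1
      · exact Or.inl (by simp [pvLcp, h, h1])
      · exact Or.inr (Or.inl (by simp [pvLcp, h, h1]))
      · exact Or.inr (Or.inr (by simp only [pvLcp, if_pos h]; simpa [h] using h1))
    · refine Or.inr (Or.inr ?_)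
      simp only [pvLcp, if_neg h, List.length_nil, List.getD_cons_zero]
      exact h

-- lexicographic sandwich: anything between a and b extends their common prefix
lemma pvLcp_prefix_of_lex_between : ∀ {a x b : List String},
    List.Lex (· < ·) a x → List.Lex (· < ·) x b → pvLcp a b <+: x
  | [], _, _, _, _ => by simp [pvLcp]
  | _ :: _, _, [], _, _ => by simp [pvLcp]
  | a :: as, x, b :: bs, h1, h2 => by
    by_cases hab : a = b
    · subst hab
      cases h1 with
      | cons h1' =>
        -- x = a :: x'
        cases h2 with
        | cons h2' =>
          simpa [pvLcp, List.cons_prefix_cons] using pvLcp_prefix_of_lex_between h1' h2'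
        | rel hr => exact absurd hr (lt_irrefl a)
      | rel hr =>
        -- x = e :: x' with a < e
        cases h2 with
        | cons h2' => exact absurd hr (lt_irrefl a)
        | rel hr2 => exact absurd hr (lt_asymm hr2)
    · simp [pvLcp, hab]
  termination_by a _ b => a.length + b.length

lemma pvLcp_prefix_of_between {a x b : List String}
    (h1 : a ≤ x) (h2 : x ≤ b) : pvLcp a b <+: x := by
  rcases lt_or_eq_of_le h1 with hlt1 | heq1
  · rcases lt_or_eq_of_le h2 with hlt2 | heq2
    · exact pvLcp_prefix_of_lex_between hlt1 hlt2
    · rw [heq2]; exact pvLcp_prefix_right a b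
  · rw [← heq1]; exact pvLcp_prefix_left a b

-- the sorted call of port A, re-read through the LinearOrder instance of Mathlib
lemma pv_sorted_inst_eq (xs : List (List String)) :
    PySem.List.sorted xs (fun x => x) =
      @PySem.List.sorted _ _ (@Preorder.toLT _ (@PartialOrder.toPreorder _ (@LinearOrder.toPartialOrder _ List.instLinearOrder))) (@LinearOrder.toDecidableLT _ List.instLinearOrder) xs (fun x => x) false := by
  rw [PySem.List.sorted_eq_foldl_insertBy]
  rw [@PySem.List.sorted_eq_foldl_insertBy _ _ (@Preorder.toLT _ (@PartialOrder.toPreorder _ (@LinearOrder.toPartialOrder _ List.instLinearOrder))) (@LinearOrder.toDecidableLT _ List.instLinearOrder) xs (fun x => x)]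
  congr 1
  funext acc x
  congr 1
  funext a b
  exact decide_eq_decide.mpr (List.lt_iff_lex_lt a b)

lemma pv_pairwise_le_getLastD : ∀ (l : List (List String)) (d : List String),
    l.Pairwise (· ≤ ·) → ∀ x ∈ l, x ≤ l.getLastD d
  | [], _, _, _, hx => by simp at hx
  | a :: t, d, hpw, x, hx => by
    obtain ⟨ha, ht⟩ := List.pairwise_cons.mp hpw
    rw [List.getLastD_cons]
    rcases List.mem_cons.mp hx with hxa | hxt
    · rw [hxa]
      cases t with
      | nil => simp
      | cons b t' =>
        exact le_trans (ha b (by simp)) (pv_pairwise_le_getLastD (b :: t') a ht b (by simp))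
    · exact pv_pairwise_le_getLastD t a ht x hxt

-- prefix gives pointwise agreement
lemma pv_prefix_getD {p x : List String} (h : p <+: x) {k : Nat} (hk : k < p.length) :
    x.getD k "" = p.getD k "" := by
  obtain ⟨t, rfl⟩ := h
  simp [List.getD_eq_getElem?_getD, List.getElem?_append_left hk]

lemma pv_getLastD_mem : ∀ (a : List String) (t : List (List String)) (d : List String),
    (a :: t).getLastD d ∈ a :: t
  | a, [], _ => by simp
  | a, b :: t', d => by
    rw [List.getLastD_cons]
    exact List.mem_cons_of_mem a (pv_getLastD_mem b t' a)

-- the loop of port B stops exactly at the first failing column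
lemma pvColScan_eq (t0 : List String) (rest : List (List String)) (N i : Nat) (hle : i ≤ N)
    (hbelow : ∀ k, i ≤ k → k < N →
      (decide (k < t0.length) && rest.all (fun t => decide (k < t.length) && (t.getD k "" == t0.getD k ""))) = true)
    (hstop : ¬ ((decide (N < t0.length) && rest.all (fun t => decide (N < t.length) && (t.getD N "" == t0.getD N ""))) = true)) :
    pvColScan t0 rest i = N := by
  rcases Nat.lt_or_ge i N with h | h
  · rw [pvColScan, dif_pos (hbelow i le_rfl h)]
    exact pvColScan_eq t0 rest N (i + 1) h (fun k hk1 hk2 => hbelow k (by omega) hk2) hstop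
  · have hiN : i = N := le_antisymm hle h
    subst hiN
    rw [pvColScan, dif_neg hstop]
termination_by N - i

-- ===== VERDICT (by name: the statement is the Claim_ definition above) =====
theorem generate_common_selector_spec : Claim_equal_generate_common_selector := by
  intro selectors _ hpre
  unfold Spec_generate_common_selector generate_common_selector generate_common_selector_alt
  cases hsel : selectors.map pvTok with
  | nil => exact absurd (List.map_eq_nil_iff.mp hsel) hpre
  | cons t0 rest =>
  simp only []
  set S := PySem.List.sorted (t0 :: rest) (fun x => x) with hSdef
  have hSne : S ≠ [] := by
    rw [hSdef, Ne, PySem.List.sorted_eq_nil_iff]; simp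
  obtain ⟨a1, tl, harrS⟩ : ∃ a1 tl, S = a1 :: tl := by
    cases hS : S with
    | nil => exact absurd hS hSne
    | cons a t => exact ⟨a, t, rfl⟩
  have hperm : S.Perm (t0 :: rest) := PySem.List.sorted_perm _ _ _
  have hpw : S.Pairwise (· ≤ ·) := by
    rw [hSdef, pv_sorted_inst_eq]
    exact PySem.List.sorted_pairwise (t0 :: rest) (fun x => x)
  set a2 := S.getLastD ([] : List String) with ha2def
  have hmin : ∀ y ∈ S, a1 ≤ y := by
    intro y hy
    rw [harrS] at hpw hy
    rcases List.mem_cons.mp hy with rfl | hyt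
    · exact le_refl _
    · exact (List.pairwise_cons.mp hpw).1 y hyt
  have hmax : ∀ y ∈ S, y ≤ a2 := pv_pairwise_le_getLastD S [] hpw
  have ha2mem : a2 ∈ S := by
    rw [ha2def, harrS]
    exact pv_getLastD_mem a1 tl []
  set P := pvLcp a1 a2 with hPdef
  set n := P.length with hndef
  have hsand : ∀ y ∈ t0 :: rest, P <+: y := fun y hy =>
    pvLcp_prefix_of_between (hmin y (hperm.mem_iff.mpr hy)) (hmax y (hperm.mem_iff.mpr hy))
  have hlen : ∀ y ∈ t0 :: rest, n ≤ y.length := fun y hy => (hsand y hy).length_le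
  have hgetD : ∀ y ∈ t0 :: rest, ∀ k < n, y.getD k "" = t0.getD k "" := by
    intro y hy k hk
    rw [pv_prefix_getD (hsand y hy) hk, pv_prefix_getD (hsand t0 (by simp)) hk]
  have hcond : ∀ k, k < n →
      (decide (k < t0.length) && rest.all (fun t => decide (k < t.length) && (t.getD k "" == t0.getD k ""))) = true := by
    intro k hk
    simp only [Bool.and_eq_true, decide_eq_true_eq, List.all_eq_true, beq_iff_eq]
    refine ⟨lt_of_lt_of_le hk (hlen t0 (by simp)), fun t ht => ⟨lt_of_lt_of_le hk (hlen t (by simp [ht])), hgetD t (by simp [ht]) k hk⟩⟩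
  have hstop : ¬ ((decide (n < t0.length) && rest.all (fun t => decide (n < t.length) && (t.getD n "" == t0.getD n ""))) = true) := by
    intro hc
    simp only [Bool.and_eq_true, decide_eq_true_eq, List.all_eq_true, beq_iff_eq] at hc
    have haux : ∀ y ∈ t0 :: rest, n < y.length ∧ y.getD n "" = t0.getD n "" := by
      intro y hy
      rcases List.mem_cons.mp hy with rfl | hyt
      · exact ⟨hc.1, rfl⟩
      · exact hc.2 y hyt
    have h1 := haux a1 (hperm.mem_iff.mp (by rw [harrS]; simp))
    have h2 := haux a2 (hperm.mem_iff.mp ha2mem)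
    rcases pvLcp_stop a1 a2 with hs | hs | hs
    · rw [← hPdef, ← hndef] at hs; omega
    · rw [← hPdef, ← hndef] at hs; omega
    · rw [← hPdef, ← hndef] at hs
      exact hs (h1.2.trans h2.2.symm)
  have hscan : pvColScan t0 rest 0 = n := pvColScan_eq t0 rest n 0 (Nat.zero_le n) (fun k _ => hcond k) hstop
  have htakeA : a1.take (pvLcpLen a1 a2) = P := by
    rw [pvLcpLen_eq, ← hPdef, ← hndef, eq_comm, ← List.prefix_iff_eq_take]
    exact pvLcp_prefix_left a1 a2
  have htakeB : t0.take n = P := by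
    rw [eq_comm, ← List.prefix_iff_eq_take]
    exact hsand t0 (by simp)
  rw [harrS]
  simp only [List.headD_cons]
  rw [hscan, htakeA, htakeB]
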